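-- pv_equiv track=rewrite | github.com/JakubWorek/introduction_to_computer_science_course | CW4/18.py | ex18
-- ===== SOURCE A (Python) =====
-- def ex18(T):
--     N=len(T)
--     result=0
--     for row in range(N):
--         for col in range(N):
--             for i in range(1,11):
--                 if(row+i<N):
--                     suma=0
--                     for x in range(row,row+i+1):
--                         suma+=T[x][col]
--                     result=max(result,suma)
--                 if(col+i<N):
--                     suma=0
--                     for x in range(col,col+i+1):
--                         suma+=T[row][x]
--                     result=max(result,suma)
--     return result
-- ===== SOURCE B (Python) =====
-- def ex18(T):
--     N = len(T)
--     result = 0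
--     for r in range(N):
--         for c in range(N):
--             s = T[r][c]
--             for rr in range(r + 1, min(r + 11, N)):
--                 s += T[rr][c]
--                 result = max(result, s)
--             s = T[r][c]
--             for cc in range(c + 1, min(c + 11, N)):
--                 s += T[r][cc]
--                 result = max(result, s)
--     return result
-- ===== Notes on version B (the rewrite author's own statement) =====
-- stated objective: faster
-- what changed: A re-sums every segment of each length 2..11 from scratch with an inner re-scan loop; B extends each segment one cell at a time with an incremental running sum over a range truncated at the grid edge, so the inner re-scan disappears.
-- outside the precondition, e.g. on ex18([[]]): A returns 0, B raises IndexError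
import Mathlib
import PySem

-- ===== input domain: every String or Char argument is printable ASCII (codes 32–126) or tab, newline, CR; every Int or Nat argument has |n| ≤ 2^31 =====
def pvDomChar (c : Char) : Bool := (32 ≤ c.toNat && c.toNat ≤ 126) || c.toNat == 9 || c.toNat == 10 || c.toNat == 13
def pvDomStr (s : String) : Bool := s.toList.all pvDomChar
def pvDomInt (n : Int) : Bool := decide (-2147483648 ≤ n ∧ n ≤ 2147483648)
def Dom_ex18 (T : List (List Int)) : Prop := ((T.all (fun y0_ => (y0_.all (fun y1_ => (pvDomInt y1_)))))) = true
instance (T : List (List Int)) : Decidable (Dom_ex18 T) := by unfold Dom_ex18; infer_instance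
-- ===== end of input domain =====

-- B replaces A's per-segment re-summing inner loop by one extending pass with a running sum
-- over a range truncated at the grid edge (constant-factor faster; return value only, no mutation).

-- shared indexing helper: T[i][j] (in-range under Pre_, default-0 reading otherwise)
def idx2 (T : List (List Int)) (i j : Int) : Int :=
  PySem.List.pyGetD (PySem.List.pyGetD T i []) j 0

-- ===== PORT A =====
def ex18 (T : List (List Int)) : Int :=
  let N : Int := T.length
  (PySem.List.pyRange 0 N 1).foldl (fun result row =>
    (PySem.List.pyRange 0 N 1).foldl (fun result col =>
      (PySem.List.pyRange 1 11 1).foldl (fun result i =>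
        let result :=
          if row + i < N then
            let suma := (PySem.List.pyRange row (row + i + 1) 1).foldl
              (fun suma x => suma + idx2 T x col) 0
            max result suma
          else result
        if col + i < N then
          let suma := (PySem.List.pyRange col (col + i + 1) 1).foldl
            (fun suma x => suma + idx2 T row x) 0
          max result suma
        else result) result) result) 0

-- ===== PORT B =====
def ex18_alt (T : List (List Int)) : Int :=
  let N : Int := T.length
  (PySem.List.pyRange 0 N 1).foldl (fun result r =>
    (PySem.List.pyRange 0 N 1).foldl (fun result c =>
      let s0 := idx2 T r c
      let result := ((PySem.List.pyRange (r + 1) (min (r + 11) N) 1).foldl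
        (fun (p : Int × Int) rr => (max p.1 (p.2 + idx2 T rr c), p.2 + idx2 T rr c)) (result, s0)).1
      ((PySem.List.pyRange (c + 1) (min (c + 11) N) 1).foldl
        (fun (p : Int × Int) cc => (max p.1 (p.2 + idx2 T r cc), p.2 + idx2 T r cc)) (result, s0)).1)
      result) 0

-- ===== PRECONDITION & SPEC =====
-- Pre_ requires every row to have at least N = len(T) entries: for N ≥ 2 A itself raises
-- IndexError on shorter rows; the only further exclusion is the degenerate grids with N = 1 and
-- an empty single row (see the cite in claim.json), where A returns 0 but B's seed read T[r][c] raises.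
def Pre_ex18 (T : List (List Int)) : Prop := ∀ row ∈ T, T.length ≤ row.length
instance (T : List (List Int)) : Decidable (Pre_ex18 T) := by unfold Pre_ex18; infer_instance
def pvWitness_ex18 : List (List Int) := [[1, -2], [3, 4]]

def Spec_ex18 (T : List (List Int)) (out : Int) : Prop := out = ex18_alt T
instance (T : List (List Int)) (out : Int) : Decidable (Spec_ex18 T out) := by unfold Spec_ex18; infer_instance

-- ===== CLAIM (what is proved, stated in full; the proofs are below) =====
def Claim_equal_ex18 : Prop := ∀ (T : List (List Int)), Dom_ex18 T → Pre_ex18 T → Spec_ex18 T (ex18 T)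

-- ===== LEMMAS AND PROOFS =====

-- sum of a x over the half-open index range [lo, hi) computed left to right (A's `suma` loop)
def segSum (a : Int → Int) (lo hi : Int) : Int :=
  (PySem.List.pyRange lo hi 1).foldl (fun s x => s + a x) 0

lemma segSum_succ (a : Int → Int) (lo hi : Int) (h : lo ≤ hi) :
    segSum a lo (hi + 1) = segSum a lo hi + a hi := by
  unfold segSum
  rw [PySem.List.pyRange_one_succ_right h, List.foldl_append]
  rfl

lemma segSum_single (a : Int → Int) (lo : Int) : segSum a lo (lo + 1) = a lo := by
  unfold segSum
  rw [PySem.List.pyRange_one_singleton]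
  simp

lemma foldl_comm_out (f g : Int → Int → Int)
    (comm : ∀ x i j, g (f x i) j = f (g x j) i) :
    ∀ (l : List Int) (x j : Int), l.foldl f (g x j) = g (l.foldl f x) j := by
  intro l
  induction l with
  | nil => intro x j; rfl
  | cons a l ih =>
    intro x j
    simp only [List.foldl_cons]
    rw [← comm x a j, ih]

lemma foldl_interleave (f g : Int → Int → Int)
    (comm : ∀ x i j, g (f x i) j = f (g x j) i) :
    ∀ (l : List Int) (x : Int),
      l.foldl (fun x i => g (f x i) i) x = l.foldl g (l.foldl f x) := by
  intro l
  induction l with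
  | nil => intro x; rfl
  | cons a l ih =>
    intro x
    simp only [List.foldl_cons]
    rw [ih, foldl_comm_out f g comm]

-- a monotone guard `i < c` on a step-1 range is the same as truncating the range at c
lemma foldl_guard (f : Int → Int → Int) (c b : Int) :
    ∀ (n : Nat) (x a : Int), (b - a).toNat ≤ n →
      (PySem.List.pyRange a b 1).foldl (fun x i => if i < c then f x i else x) x
        = (PySem.List.pyRange a (min b c) 1).foldl f x := by
  intro n
  induction n with
  | zero =>
    intro x a h
    rw [PySem.List.pyRange_one_eq_nil (by omega : b ≤ a),
      PySem.List.pyRange_one_eq_nil (by omega : min b c ≤ a)]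
    rfl
  | succ n ih =>
    intro x a h
    by_cases hab : a < b
    · rw [show PySem.List.pyRange a b 1 = a :: PySem.List.pyRange (a + 1) b 1 from
        PySem.List.pyRange_one_cons hab]
      simp only [List.foldl_cons]
      by_cases hac : a < c
      · rw [show PySem.List.pyRange a (min b c) 1
              = a :: PySem.List.pyRange (a + 1) (min b c) 1 from
            PySem.List.pyRange_one_cons (by omega : a < min b c)]
        simp only [List.foldl_cons, if_pos hac]
        exact ih (f x a) (a + 1) (by omega)
      · rw [if_neg hac, ih x (a + 1) (by omega),
          PySem.List.pyRange_one_eq_nil (by omega : min b c ≤ a + 1),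
          PySem.List.pyRange_one_eq_nil (by omega : min b c ≤ a)]
    · rw [PySem.List.pyRange_one_eq_nil (by omega : b ≤ a),
        PySem.List.pyRange_one_eq_nil (by omega : min b c ≤ a)]
      rfl

-- B's running-sum pair fold computes A's guardless per-length max fold
lemma pairfold (a : Int → Int) (r b : Int) :
    ∀ (n : Nat) (j res : Int), 0 ≤ j → (b - (r + j + 1)).toNat ≤ n →
      ((PySem.List.pyRange (r + j + 1) b 1).foldl
          (fun (p : Int × Int) rr => (max p.1 (p.2 + a rr), p.2 + a rr))
          (res, segSum a r (r + j + 1))).1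
        = (PySem.List.pyRange (j + 1) (b - r) 1).foldl
            (fun res i => max res (segSum a r (r + i + 1))) res := by
  intro n
  induction n with
  | zero =>
    intro j res hj h
    rw [PySem.List.pyRange_one_eq_nil (by omega : b ≤ r + j + 1),
      PySem.List.pyRange_one_eq_nil (by omega : b - r ≤ j + 1)]
    rfl
  | succ n ih =>
    intro j res hj h
    by_cases hlt : r + j + 1 < b
    · rw [show PySem.List.pyRange (r + j + 1) b 1
            = (r + j + 1) :: PySem.List.pyRange (r + j + 1 + 1) b 1 from
          PySem.List.pyRange_one_cons hlt,
        show PySem.List.pyRange (j + 1) (b - r) 1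
            = (j + 1) :: PySem.List.pyRange (j + 1 + 1) (b - r) 1 from
          PySem.List.pyRange_one_cons (by omega : j + 1 < b - r)]
      simp only [List.foldl_cons]
      have hseg : segSum a r (r + j + 1) + a (r + j + 1) = segSum a r (r + (j + 1) + 1) := by
        rw [show r + (j + 1) + 1 = (r + j + 1) + 1 by ring,
          segSum_succ a r (r + j + 1) (by omega)]
      have hih := ih (j + 1) (max res (segSum a r (r + (j + 1) + 1))) (by omega) (by omega)
      rw [show r + j + 1 + 1 = r + (j + 1) + 1 by ring] at *
      simpa [hseg] using hih
    · rw [PySem.List.pyRange_one_eq_nil (by omega : b ≤ r + j + 1),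
        PySem.List.pyRange_one_eq_nil (by omega : b - r ≤ j + 1)]
      rfl

-- one direction: B's truncated extending pass equals A's guarded per-length fold
lemma dir (a : Int → Int) (r N res : Int) :
    ((PySem.List.pyRange (r + 1) (min (r + 11) N) 1).foldl
        (fun (p : Int × Int) rr => (max p.1 (p.2 + a rr), p.2 + a rr)) (res, a r)).1
      = (PySem.List.pyRange 1 11 1).foldl
          (fun res i => if r + i < N then max res (segSum a r (r + i + 1)) else res) res := by
  have hcond : (fun (res i : Int) => if r + i < N then max res (segSum a r (r + i + 1)) else res)
      = fun res i => if i < N - r then max res (segSum a r (r + i + 1)) else res := by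
    funext res i
    by_cases hc : r + i < N
    · rw [if_pos hc, if_pos (by omega : i < N - r)]
    · rw [if_neg hc, if_neg (by omega : ¬ i < N - r)]
  have hguard : (PySem.List.pyRange 1 11 1).foldl
        (fun (res i : Int) => if i < N - r then max res (segSum a r (r + i + 1)) else res) res
      = (PySem.List.pyRange 1 (min 11 (N - r)) 1).foldl
          (fun res i => max res (segSum a r (r + i + 1))) res :=
    foldl_guard (fun res i => max res (segSum a r (r + i + 1))) (N - r) 11 10 res 1 (by decide)
  rw [hcond, hguard]
  have hseed : a r = segSum a r (r + 0 + 1) := by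
    rw [show r + 0 + 1 = r + 1 by ring]
    exact (segSum_single a r).symm
  rw [hseed, show r + 1 = r + 0 + 1 by ring,
    pairfold a r (min (r + 11) N) ((min (r + 11) N) - (r + 0 + 1)).toNat 0 res le_rfl le_rfl,
    show (0 : Int) + 1 = 1 by norm_num,
    show min (r + 11) N - r = min 11 (N - r) by omega]

-- per-cell equality of the two inner computations (A's interleaved guarded passes vs
-- B's two truncated extending passes)
lemma cell (T : List (List Int)) (N row col res : Int) :
    (PySem.List.pyRange 1 11 1).foldl (fun result i =>
        if col + i < N then
          max (if row + i < N then max result (segSum (fun t => idx2 T t col) row (row + i + 1))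
               else result)
            (segSum (fun t => idx2 T row t) col (col + i + 1))
        else
          if row + i < N then max result (segSum (fun t => idx2 T t col) row (row + i + 1))
          else result) res
      = ((PySem.List.pyRange (col + 1) (min (col + 11) N) 1).foldl
          (fun (p : Int × Int) cc => (max p.1 (p.2 + idx2 T row cc), p.2 + idx2 T row cc))
          ((((PySem.List.pyRange (row + 1) (min (row + 11) N) 1).foldl
              (fun (p : Int × Int) rr => (max p.1 (p.2 + idx2 T rr col), p.2 + idx2 T rr col))
              (res, idx2 T row col)).1), idx2 T row col)).1 := by
  have comm : ∀ x i j,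
      (fun (x j : Int) => if col + j < N then max x (segSum (fun t => idx2 T row t) col (col + j + 1)) else x)
        ((fun (x i : Int) => if row + i < N then max x (segSum (fun t => idx2 T t col) row (row + i + 1)) else x) x i) j
      = (fun (x i : Int) => if row + i < N then max x (segSum (fun t => idx2 T t col) row (row + i + 1)) else x)
        ((fun (x j : Int) => if col + j < N then max x (segSum (fun t => idx2 T row t) col (col + j + 1)) else x) x j) i := by
    intro x i j
    by_cases h1 : row + i < N <;> by_cases h2 : col + j < N <;>
      simp [h1, h2, max_right_comm]
  refine Eq.trans (foldl_interleave
    (fun (x i : Int) => if row + i < N then max x (segSum (fun t => idx2 T t col) row (row + i + 1)) else x)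
    (fun (x j : Int) => if col + j < N then max x (segSum (fun t => idx2 T row t) col (col + j + 1)) else x)
    comm (PySem.List.pyRange 1 11 1) res) ?_
  rw [← dir (fun t => idx2 T t col) row N res,
    ← dir (fun t => idx2 T row t) col N
      (((PySem.List.pyRange (row + 1) (min (row + 11) N) 1).foldl
        (fun (p : Int × Int) rr => (max p.1 (p.2 + idx2 T rr col), p.2 + idx2 T rr col))
        (res, idx2 T row col)).1)]

-- ===== VERDICT (by name: the statement is the Claim_ definition above) =====
theorem ex18_spec : Claim_equal_ex18 := by
  intro T _hDom _hPre
  unfold Spec_ex18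
  simp only [ex18, ex18_alt]
  apply List.foldl_ext
  intro res row _
  apply List.foldl_ext
  intro res col _
  exact cell T (T.length : Int) row col res
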